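-- pv_equiv track=rewrite | github.com/jihunroh/ProjectEuler-Python | ProjectEuler.Problem.089.py | shorten_roman
-- ===== SOURCE A (Python) =====
-- def shorten_roman(roman):
--     shorten_dic = {
--         'VIIII': 'IX', #9
--         'LXXXX': 'XC', #90
--         'DCCCC': 'CM', #900
--         'IIII' : 'IV', #4
--         'XXXX' : 'XL', #40
--         'CCCC' : 'CD'  #400
--     }
--     for key, value in shorten_dic.items():
--         roman = roman.replace(key, value)
--
--     return roman
-- ===== SOURCE B (Python) =====
-- def _pass(roman, table, k):
--     out = []
--     i = 0
--     n = len(roman)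
--     while i < n:
--         chunk = roman[i:i + k]
--         if chunk in table:
--             out.append(table[chunk])
--             i += k
--         else:
--             out.append(roman[i])
--             i += 1
--     return ''.join(out)
--
--
-- def shorten_roman(roman):
--     roman = _pass(roman, {'VIIII': 'IX', 'LXXXX': 'XC', 'DCCCC': 'CM'}, 5)
--     return _pass(roman, {'IIII': 'IV', 'XXXX': 'XL', 'CCCC': 'CD'}, 4)
-- ===== Notes on version B (the rewrite author's own statement) =====
-- stated objective: alternative
-- what changed: A makes six sequential full-string str.replace passes (one per key); B makes two left-to-right multi-pattern scans over the string (one for the three 5-char keys, one for the three 4-char keys), deciding at each position via a chunk lookup in a key table.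
import Mathlib
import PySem

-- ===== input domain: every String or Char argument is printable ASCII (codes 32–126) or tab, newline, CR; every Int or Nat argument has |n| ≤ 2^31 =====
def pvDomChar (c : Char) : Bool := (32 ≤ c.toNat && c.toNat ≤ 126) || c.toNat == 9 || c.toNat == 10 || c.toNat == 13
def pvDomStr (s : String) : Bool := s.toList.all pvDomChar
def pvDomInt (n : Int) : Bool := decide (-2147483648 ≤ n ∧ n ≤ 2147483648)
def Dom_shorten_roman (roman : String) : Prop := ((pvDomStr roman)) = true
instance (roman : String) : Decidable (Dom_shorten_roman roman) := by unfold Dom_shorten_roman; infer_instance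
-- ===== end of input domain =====

set_option maxRecDepth 8192


-- B replaces A's six sequential full-string `replace` passes by two multi-pattern
-- left-to-right scans (5-char keys, then 4-char keys); same return value on every input.

-- ===== PORT A =====
-- A: loop over the dict items, roman = roman.replace(key, value) each time.
def shorten_roman (roman : String) : String :=
  [("VIIII", "IX"), ("LXXXX", "XC"), ("DCCCC", "CM"),
   ("IIII", "IV"), ("XXXX", "XL"), ("CCCC", "CD")].foldl
    (fun r kv => PySem.Str.replace r kv.1 kv.2) roman

-- ===== PORT B =====
-- B helper `_pass(roman, table, 5)`: one scan, at each position compare the 5-char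
-- chunk with the table keys (in dict order), emit the value and skip 5, else copy one char.
def pvPass5 : List Char → List Char
  | [] => []
  | c :: t =>
    if List.take 5 (c :: t) = ['V', 'I', 'I', 'I', 'I'] then
      'I' :: 'X' :: pvPass5 (List.drop 4 t)
    else if List.take 5 (c :: t) = ['L', 'X', 'X', 'X', 'X'] then
      'X' :: 'C' :: pvPass5 (List.drop 4 t)
    else if List.take 5 (c :: t) = ['D', 'C', 'C', 'C', 'C'] then
      'C' :: 'M' :: pvPass5 (List.drop 4 t)
    else c :: pvPass5 t
termination_by l => l.length
decreasing_by all_goals (simp; try omega)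

-- B helper `_pass(roman, table, 4)`: same scan with the 4-char keys.
def pvPass4 : List Char → List Char
  | [] => []
  | c :: t =>
    if List.take 4 (c :: t) = ['I', 'I', 'I', 'I'] then
      'I' :: 'V' :: pvPass4 (List.drop 3 t)
    else if List.take 4 (c :: t) = ['X', 'X', 'X', 'X'] then
      'X' :: 'L' :: pvPass4 (List.drop 3 t)
    else if List.take 4 (c :: t) = ['C', 'C', 'C', 'C'] then
      'C' :: 'D' :: pvPass4 (List.drop 3 t)
    else c :: pvPass4 t
termination_by l => l.length
decreasing_by all_goals (simp; try omega)

def shorten_roman_alt (roman : String) : String :=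
  String.ofList (pvPass4 (pvPass5 roman.toList))

-- ===== PRECONDITION & SPEC =====
def Spec_shorten_roman (roman : String) (out : String) : Prop := out = shorten_roman_alt roman
instance (roman : String) (out : String) : Decidable (Spec_shorten_roman roman out) := by unfold Spec_shorten_roman; infer_instance

-- ===== CLAIM (what is proved, stated in full; the proofs are below) =====
def Claim_equal_shorten_roman : Prop := ∀ (roman : String), Dom_shorten_roman roman → Spec_shorten_roman roman (shorten_roman roman)

-- ===== LEMMAS AND PROOFS =====

-- Recursion-friendly characterisation of Python's str.replace with a nonempty key.
def pvRep (o : Char) (os nv : List Char) : List Char → List Char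
  | [] => []
  | c :: t =>
    if (o :: os).isPrefixOf (c :: t) then nv ++ pvRep o os nv (List.drop os.length t)
    else c :: pvRep o os nv t
termination_by l => l.length
decreasing_by all_goals (simp; try omega)

theorem pvRep_go (o : Char) (os nv : List Char) (fuel : Nat) :
    ∀ (l acc : List Char), l.length ≤ fuel →
      PySem.Chars.replace.go (o :: os) nv fuel l acc = acc.reverse ++ pvRep o os nv l := by
  induction fuel with
  | zero =>
    intro l acc h
    have : l = [] := by cases l <;> simp_all
    subst this
    simp [PySem.Chars.replace.go, pvRep]
  | succ n ih =>
    intro l acc h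
    cases l with
    | nil => simp [PySem.Chars.replace.go, pvRep]
    | cons c t =>
      rw [PySem.Chars.replace.go]
      by_cases hp : (o :: os).isPrefixOf (c :: t)
      · rw [if_pos hp, pvRep, if_pos hp]
        have hd : List.drop (o :: os).length (c :: t) = List.drop os.length t := by simp
        rw [hd, ih _ _ (by simp at h ⊢; omega)]
        simp
      · rw [if_neg hp, pvRep, if_neg hp, ih _ _ (by simp at h; omega)]
        simp

theorem replace_eq_pvRep (s : List Char) (o : Char) (os nv : List Char) :
    PySem.Chars.replace s (o :: os) nv = pvRep o os nv s := by
  rw [PySem.Chars.replace]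
  simp [pvRep_go o os nv s.length s [] le_rfl]

-- one scan step when the key does not match at the head
theorem pvRep_cons_neg (o : Char) (os nv : List Char) (c : Char) (t : List Char)
    (h : ¬ (o :: os).isPrefixOf (c :: t) = true) :
    pvRep o os nv (c :: t) = c :: pvRep o os nv t := by
  rw [pvRep, if_neg h]

theorem pvRep_cons_of_head_ne (o : Char) (os nv : List Char) (c : Char) (t : List Char)
    (h : c ≠ o) : pvRep o os nv (c :: t) = c :: pvRep o os nv t := by
  apply pvRep_cons_neg
  simp [List.isPrefixOf]
  intro h'
  exact absurd h'.symm h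

theorem pvRep_cons_pos (o : Char) (os nv : List Char) (c : Char) (t : List Char)
    (h : (o :: os).isPrefixOf (c :: t) = true) :
    pvRep o os nv (c :: t) = nv ++ pvRep o os nv (List.drop os.length t) := by
  rw [pvRep, if_pos h]

-- no-creation: a replacement whose text starts with a character ≠ d cannot create a
-- new run of d's at the front of the output
theorem pvRep_replicate_prefix (o : Char) (os : List Char) (h : Char) (nr : List Char)
    (d : Char) (hne : h ≠ d) :
    ∀ (t : List Char) (k : Nat),
      (List.replicate k d).isPrefixOf (pvRep o os (h :: nr) t) = true →
      (List.replicate k d).isPrefixOf t = true := by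
  intro t
  induction t using pvRep.induct o os with
  | case1 =>
    intro k hk
    simpa [pvRep] using hk
  | case2 c t hp ih =>
    intro k hk
    rw [pvRep_cons_pos _ _ _ _ _ hp] at hk
    cases k with
    | zero => simp
    | succ k' =>
      simp [List.replicate, List.isPrefixOf] at hk
      exact absurd hk.1.symm hne
  | case3 c t hp ih =>
    intro k hk
    rw [pvRep_cons_neg _ _ _ _ _ hp] at hk
    cases k with
    | zero => simp
    | succ k' =>
      simp [List.replicate, List.isPrefixOf] at hk ⊢
      exact ⟨hk.1, List.isPrefixOf_iff_prefix.mp (ih k' (List.isPrefixOf_iff_prefix.mpr hk.2))⟩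

-- scanning past a block of characters none of which equals the key's first character
theorem pvRep_append_skip (o : Char) (os nv : List Char) (bs : List Char)
    (hb : ∀ b ∈ bs, b ≠ o) (u : List Char) :
    pvRep o os nv (bs ++ u) = bs ++ pvRep o os nv u := by
  induction bs with
  | nil => simp
  | cons b bs ih =>
    simp only [List.cons_append]
    rw [pvRep_cons_of_head_ne _ _ _ _ _ (hb b (by simp)),
        ih (fun x hx => hb x (by simp [hx]))]

-- scanning a position where the key matches
theorem pvRep_match (o : Char) (os nv u : List Char) :
    pvRep o os nv ((o :: os) ++ u) = nv ++ pvRep o os nv u := by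
  simp only [List.cons_append]
  rw [pvRep_cons_pos _ _ _ _ _ (by
    rw [List.isPrefixOf_iff_prefix]
    exact List.prefix_append _ _)]
  rw [List.drop_left]

theorem take_eq_iff_prefix (l key : List Char) (n : Nat) (hk : key.length = n) :
    List.take n l = key ↔ key <+: l := by
  constructor
  · intro h
    exact h ▸ List.take_prefix n l
  · intro h
    rw [List.prefix_iff_eq_take.mp h, hk]

theorem pass5_eq (l : List Char) :
    pvRep 'D' ['C','C','C','C'] ['C','M']
      (pvRep 'L' ['X','X','X','X'] ['X','C']
        (pvRep 'V' ['I','I','I','I'] ['I','X'] l)) = pvPass5 l := by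
  induction l using pvPass5.induct with
  | case1 => simp [pvRep, pvPass5]
  | case2 c t h ih =>
    obtain ⟨r, hr⟩ := (take_eq_iff_prefix (c :: t) _ 5 (by simp)).mp h
    have hrt : r = List.drop 4 t := by simpa using congrArg (List.drop 5) hr
    rw [← hrt] at ih
    rw [pvPass5, if_pos h, ← hrt, ← hr]
    rw [show (['V','I','I','I','I'] : List Char) = 'V' :: ['I','I','I','I'] from rfl,
        pvRep_match,
        pvRep_append_skip 'L' ['X','X','X','X'] ['X','C'] ['I','X'] (by simp),
        pvRep_append_skip 'D' ['C','C','C','C'] ['C','M'] ['I','X'] (by simp)]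
    simp only [List.cons_append, List.nil_append]
    rw [ih]
  | case3 c t h1 h ih =>
    obtain ⟨r, hr⟩ := (take_eq_iff_prefix (c :: t) _ 5 (by simp)).mp h
    have hrt : r = List.drop 4 t := by simpa using congrArg (List.drop 5) hr
    rw [← hrt] at ih
    rw [pvPass5, if_neg h1, if_pos h, ← hrt, ← hr]
    rw [pvRep_append_skip 'V' ['I','I','I','I'] ['I','X'] ['L','X','X','X','X'] (by simp),
        show (['L','X','X','X','X'] : List Char) = 'L' :: ['X','X','X','X'] from rfl,
        pvRep_match,
        pvRep_append_skip 'D' ['C','C','C','C'] ['C','M'] ['X','C'] (by simp)]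
    simp only [List.cons_append, List.nil_append]
    rw [ih]
  | case4 c t h1 h2 h ih =>
    obtain ⟨r, hr⟩ := (take_eq_iff_prefix (c :: t) _ 5 (by simp)).mp h
    have hrt : r = List.drop 4 t := by simpa using congrArg (List.drop 5) hr
    rw [← hrt] at ih
    rw [pvPass5, if_neg h1, if_neg h2, if_pos h, ← hrt, ← hr]
    rw [pvRep_append_skip 'V' ['I','I','I','I'] ['I','X'] ['D','C','C','C','C'] (by simp),
        pvRep_append_skip 'L' ['X','X','X','X'] ['X','C'] ['D','C','C','C','C'] (by simp),
        show (['D','C','C','C','C'] : List Char) = 'D' :: ['C','C','C','C'] from rfl,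
        pvRep_match]
    simp only [List.cons_append, List.nil_append]
    rw [ih]
  | case5 c t h1 h2 h3 ih =>
    rw [pvPass5, if_neg h1, if_neg h2, if_neg h3]
    rw [pvRep_cons_neg _ _ _ _ _ (by
      intro hpre
      exact h1 ((take_eq_iff_prefix _ _ _ (by simp)).mpr (List.isPrefixOf_iff_prefix.mp hpre)))]
    rw [pvRep_cons_neg _ _ _ _ _ (by
      intro hpre
      simp [List.isPrefixOf] at hpre
      obtain ⟨hc, hrest⟩ := hpre
      have h4 : (List.replicate 4 'X').isPrefixOf (pvRep 'V' ['I','I','I','I'] ['I','X'] t) = true := by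
        simpa [List.replicate] using hrest
      have ht4 := pvRep_replicate_prefix _ _ _ _ _ (by decide) t 4 h4
      apply h2
      rw [take_eq_iff_prefix _ _ _ (by simp), ← hc]
      exact List.cons_prefix_cons.mpr ⟨rfl, by
        simpa [List.replicate] using List.isPrefixOf_iff_prefix.mp ht4⟩)]
    rw [pvRep_cons_neg _ _ _ _ _ (by
      intro hpre
      simp [List.isPrefixOf] at hpre
      obtain ⟨hc, hrest⟩ := hpre
      have h4 : (List.replicate 4 'C').isPrefixOf
          (pvRep 'L' ['X','X','X','X'] ['X','C'] (pvRep 'V' ['I','I','I','I'] ['I','X'] t)) = true := by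
        simpa [List.replicate] using hrest
      have h4' := pvRep_replicate_prefix _ _ _ _ _ (by decide) _ 4 h4
      have ht4 := pvRep_replicate_prefix _ _ _ _ _ (by decide) t 4 h4'
      apply h3
      rw [take_eq_iff_prefix _ _ _ (by simp), ← hc]
      exact List.cons_prefix_cons.mpr ⟨rfl, by
        simpa [List.replicate] using List.isPrefixOf_iff_prefix.mp ht4⟩)]
    rw [ih]

theorem pass4_eq (l : List Char) :
    pvRep 'C' ['C','C','C'] ['C','D']
      (pvRep 'X' ['X','X','X'] ['X','L']
        (pvRep 'I' ['I','I','I'] ['I','V'] l)) = pvPass4 l := by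
  induction l using pvPass4.induct with
  | case1 => simp [pvRep, pvPass4]
  | case2 c t h ih =>
    obtain ⟨r, hr⟩ := (take_eq_iff_prefix (c :: t) _ 4 (by simp)).mp h
    have hrt : r = List.drop 3 t := by simpa using congrArg (List.drop 4) hr
    rw [← hrt] at ih
    rw [pvPass4, if_pos h, ← hrt, ← hr]
    rw [show (['I','I','I','I'] : List Char) = 'I' :: ['I','I','I'] from rfl,
        pvRep_match,
        pvRep_append_skip 'X' ['X','X','X'] ['X','L'] ['I','V'] (by simp),
        pvRep_append_skip 'C' ['C','C','C'] ['C','D'] ['I','V'] (by simp)]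
    simp only [List.cons_append, List.nil_append]
    rw [ih]
  | case3 c t h1 h ih =>
    obtain ⟨r, hr⟩ := (take_eq_iff_prefix (c :: t) _ 4 (by simp)).mp h
    have hrt : r = List.drop 3 t := by simpa using congrArg (List.drop 4) hr
    rw [← hrt] at ih
    rw [pvPass4, if_neg h1, if_pos h, ← hrt, ← hr]
    rw [pvRep_append_skip 'I' ['I','I','I'] ['I','V'] ['X','X','X','X'] (by simp),
        show (['X','X','X','X'] : List Char) = 'X' :: ['X','X','X'] from rfl,
        pvRep_match,
        pvRep_append_skip 'C' ['C','C','C'] ['C','D'] ['X','L'] (by simp)]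
    simp only [List.cons_append, List.nil_append]
    rw [ih]
  | case4 c t h1 h2 h ih =>
    obtain ⟨r, hr⟩ := (take_eq_iff_prefix (c :: t) _ 4 (by simp)).mp h
    have hrt : r = List.drop 3 t := by simpa using congrArg (List.drop 4) hr
    rw [← hrt] at ih
    rw [pvPass4, if_neg h1, if_neg h2, if_pos h, ← hrt, ← hr]
    rw [pvRep_append_skip 'I' ['I','I','I'] ['I','V'] ['C','C','C','C'] (by simp),
        pvRep_append_skip 'X' ['X','X','X'] ['X','L'] ['C','C','C','C'] (by simp),
        show (['C','C','C','C'] : List Char) = 'C' :: ['C','C','C'] from rfl,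
        pvRep_match]
    simp only [List.cons_append, List.nil_append]
    rw [ih]
  | case5 c t h1 h2 h3 ih =>
    rw [pvPass4, if_neg h1, if_neg h2, if_neg h3]
    rw [pvRep_cons_neg _ _ _ _ _ (by
      intro hpre
      exact h1 ((take_eq_iff_prefix _ _ _ (by simp)).mpr (List.isPrefixOf_iff_prefix.mp hpre)))]
    rw [pvRep_cons_neg _ _ _ _ _ (by
      intro hpre
      simp [List.isPrefixOf] at hpre
      obtain ⟨hc, hrest⟩ := hpre
      have h4 : (List.replicate 3 'X').isPrefixOf (pvRep 'I' ['I','I','I'] ['I','V'] t) = true := by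
        simpa [List.replicate] using hrest
      have ht4 := pvRep_replicate_prefix _ _ _ _ _ (by decide) t 3 h4
      apply h2
      rw [take_eq_iff_prefix _ _ _ (by simp), ← hc]
      exact List.cons_prefix_cons.mpr ⟨rfl, by
        simpa [List.replicate] using List.isPrefixOf_iff_prefix.mp ht4⟩)]
    rw [pvRep_cons_neg _ _ _ _ _ (by
      intro hpre
      simp [List.isPrefixOf] at hpre
      obtain ⟨hc, hrest⟩ := hpre
      have h4 : (List.replicate 3 'C').isPrefixOf
          (pvRep 'X' ['X','X','X'] ['X','L'] (pvRep 'I' ['I','I','I'] ['I','V'] t)) = true := by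
        simpa [List.replicate] using hrest
      have h4' := pvRep_replicate_prefix _ _ _ _ _ (by decide) _ 3 h4
      have ht4 := pvRep_replicate_prefix _ _ _ _ _ (by decide) t 3 h4'
      apply h3
      rw [take_eq_iff_prefix _ _ _ (by simp), ← hc]
      exact List.cons_prefix_cons.mpr ⟨rfl, by
        simpa [List.replicate] using List.isPrefixOf_iff_prefix.mp ht4⟩)]
    rw [ih]

-- ===== VERDICT (by name: the statement is the Claim_ definition above) =====
theorem shorten_roman_spec : Claim_equal_shorten_roman := by
  intro roman _
  unfold Spec_shorten_roman shorten_roman shorten_roman_alt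
  simp only [List.foldl_cons, List.foldl_nil, PySem.Str.replace]
  simp only [String.toList_ofList]
  rw [show ("VIIII".toList) = ['V','I','I','I','I'] from rfl,
      show ("IX".toList) = ['I','X'] from rfl,
      show ("LXXXX".toList) = ['L','X','X','X','X'] from rfl,
      show ("XC".toList) = ['X','C'] from rfl,
      show ("DCCCC".toList) = ['D','C','C','C','C'] from rfl,
      show ("CM".toList) = ['C','M'] from rfl,
      show ("IIII".toList) = ['I','I','I','I'] from rfl,
      show ("IV".toList) = ['I','V'] from rfl,
      show ("XXXX".toList) = ['X','X','X','X'] from rfl,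
      show ("XL".toList) = ['X','L'] from rfl,
      show ("CCCC".toList) = ['C','C','C','C'] from rfl,
      show ("CD".toList) = ['C','D'] from rfl]
  simp only [replace_eq_pvRep]
  rw [pass5_eq, pass4_eq]
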